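-- pv_equiv track=rewrite | github.com/SWORDIntel/WIFUCKER | wifucker_pkg/crackers/router_cracker.py | detect_uk_provider
-- ===== SOURCE A (Python) =====
-- from typing import List, Set, Optional, Callable, Dict
--
-- def detect_uk_provider(ssid: str) -> Optional[str]:
--     """
--     Detect UK provider from SSID
--
--     Args:
--         ssid: Network SSID
--
--     Returns:
--         Provider name or None
--     """
--     ssid_lower = ssid.lower()
--
--     # Virgin Media patterns
--     if any(keyword in ssid_lower for keyword in ['vm', 'virgin', 'superhub']):
--         return 'virgin_media'
--
--     # BT patterns
--     if any(keyword in ssid_lower for keyword in ['bt', 'bthub', 'homehub', 'smarthub']):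
--         return 'bt'
--
--     # EE patterns
--     if any(keyword in ssid_lower for keyword in ['ee', 'brightbox', 'ee-']):
--         return 'ee'
--
--     # Sky patterns
--     if 'sky' in ssid_lower:
--         return 'sky'
--
--     # TalkTalk patterns
--     if 'talktalk' in ssid_lower or 'tt-' in ssid_lower:
--         return 'talk_talk'
--
--     return None
-- ===== SOURCE B (Python) =====
-- _KEYWORDS = {
--     'vm': 0, 'virgin': 0, 'superhub': 0,
--     'bt': 1, 'bthub': 1, 'homehub': 1, 'smarthub': 1,
--     'ee': 2, 'brightbox': 2, 'ee-': 2,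
--     'sky': 3,
--     'talktalk': 4, 'tt-': 4,
-- }
-- _NAMES = ['virgin_media', 'bt', 'ee', 'sky', 'talk_talk']
--
-- def detect_uk_provider(ssid: str):
--     # Single scan over positions: at each suffix, a startswith check against a
--     # flat keyword->priority map; keep the minimum priority matched (5 = none).
--     s = ssid.lower()
--     best = 5
--     for i in range(len(s)):
--         suffix = s[i:]
--         for k, p in _KEYWORDS.items():
--             if p < best and suffix.startswith(k):
--                 best = p
--     return _NAMES[best] if best < 5 else None
-- ===== Notes on version B (the rewrite author's own statement) =====
-- stated objective: alternative
-- what changed: Replaces A's ordered chain of per-keyword substring searches with early return by a single positional scan of the lowered SSID that checks each suffix against a flat keyword-to-priority map and keeps the minimum matched priority, which is decoded to the provider name at the end.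
import Mathlib
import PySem

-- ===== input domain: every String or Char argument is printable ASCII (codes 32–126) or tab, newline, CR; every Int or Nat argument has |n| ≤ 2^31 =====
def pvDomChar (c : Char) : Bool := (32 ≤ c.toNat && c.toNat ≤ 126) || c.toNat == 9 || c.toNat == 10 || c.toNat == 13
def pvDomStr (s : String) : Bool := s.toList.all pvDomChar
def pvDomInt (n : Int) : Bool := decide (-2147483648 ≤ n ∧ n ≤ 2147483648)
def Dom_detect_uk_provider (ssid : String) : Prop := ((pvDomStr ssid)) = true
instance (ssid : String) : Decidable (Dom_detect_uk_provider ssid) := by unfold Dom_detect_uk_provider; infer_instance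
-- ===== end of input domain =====

-- B replaces A's ordered chain of per-keyword substring searches (early return) by a
-- single positional scan of the lowered SSID keeping the minimum matched keyword
-- priority (objective: alternative algorithm, same cost).

-- ===== PORT A =====
def detect_uk_provider (ssid : String) : Option String :=
  let ssid_lower := PySem.Str.lower ssid
  if (["vm", "virgin", "superhub"].any fun keyword => PySem.Str.isIn keyword ssid_lower) then
    some "virgin_media"
  else if (["bt", "bthub", "homehub", "smarthub"].any fun keyword => PySem.Str.isIn keyword ssid_lower) then
    some "bt"
  else if (["ee", "brightbox", "ee-"].any fun keyword => PySem.Str.isIn keyword ssid_lower) then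
    some "ee"
  else if PySem.Str.isIn "sky" ssid_lower then
    some "sky"
  else if PySem.Str.isIn "talktalk" ssid_lower || PySem.Str.isIn "tt-" ssid_lower then
    some "talk_talk"
  else
    none

-- ===== PORT B =====
-- _KEYWORDS dict (insertion order) as an association list keyword -> priority
def pvKeywords : List (String × Int) :=
  [("vm", 0), ("virgin", 0), ("superhub", 0),
   ("bt", 1), ("bthub", 1), ("homehub", 1), ("smarthub", 1),
   ("ee", 2), ("brightbox", 2), ("ee-", 2),
   ("sky", 3),
   ("talktalk", 4), ("tt-", 4)]

def pvNames : List String := ["virgin_media", "bt", "ee", "sky", "talk_talk"]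

def detect_uk_provider_alt (ssid : String) : Option String :=
  let s := PySem.Str.lower ssid
  let best := (PySem.List.pyRange 0 (PySem.Str.len s) 1).foldl
    (fun best i =>
      let suffix := PySem.Str.slice s (some i) none
      pvKeywords.foldl
        (fun best kp => if kp.2 < best ∧ PySem.Str.startswith suffix kp.1 then kp.2 else best)
        best)
    5
  if best < 5 then PySem.List.pyGet? pvNames best else none

-- ===== PRECONDITION & SPEC =====
def Spec_detect_uk_provider (ssid : String) (out : Option String) : Prop := out = detect_uk_provider_alt ssid
instance (ssid : String) (out : Option String) : Decidable (Spec_detect_uk_provider ssid out) := by unfold Spec_detect_uk_provider; infer_instance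

-- ===== CLAIM (what is proved, stated in full; the proofs are below) =====
def Claim_equal_detect_uk_provider : Prop := ∀ (ssid : String), Dom_detect_uk_provider ssid → Spec_detect_uk_provider ssid (detect_uk_provider ssid)

-- ===== LEMMAS AND PROOFS =====

-- generic characterization of the min-keeping fold used by B
def pvF {β : Type} (q : β → Bool) (v : β → Int) (b : Int) (L : List β) : Int :=
  L.foldl (fun b x => if v x < b ∧ q x = true then v x else b) b

theorem pvF_le {β : Type} (q : β → Bool) (v : β → Int) :
    ∀ (L : List β) (b : Int), pvF q v b L ≤ b := by
  intro L
  induction L with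
  | nil => intro b; simp [pvF]
  | cons y L ih =>
    intro b
    have h := ih (if v y < b ∧ q y = true then v y else b)
    simp only [pvF, List.foldl_cons] at h ⊢
    split_ifs at h ⊢ with hc <;> omega

theorem pvF_achieved {β : Type} (q : β → Bool) (v : β → Int) :
    ∀ (L : List β) (b : Int), pvF q v b L = b ∨ ∃ x ∈ L, q x = true ∧ pvF q v b L = v x := by
  intro L
  induction L with
  | nil => intro b; left; simp [pvF]
  | cons y L ih =>
    intro b
    have hstep : pvF q v b (y :: L) = pvF q v (if v y < b ∧ q y = true then v y else b) L := rfl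
    rcases ih (if v y < b ∧ q y = true then v y else b) with h | ⟨x, hx, hq, he⟩
    · rw [hstep, h]
      by_cases hc : v y < b ∧ q y = true
      · right; exact ⟨y, List.mem_cons_self, hc.2, by simp [hc]⟩
      · left; simp [hc]
    · right; exact ⟨x, List.mem_cons_of_mem _ hx, hq, by rw [hstep]; exact he⟩

theorem pvF_upper {β : Type} (q : β → Bool) (v : β → Int) :
    ∀ (L : List β) (b : Int) (x : β), x ∈ L → q x = true → pvF q v b L ≤ v x := by
  intro L
  induction L with
  | nil => intro b x hx; simp at hx
  | cons y L ih =>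
    intro b x hx hq
    have hstep : pvF q v b (y :: L) = pvF q v (if v y < b ∧ q y = true then v y else b) L := rfl
    rcases List.mem_cons.mp hx with rfl | hx
    · rw [hstep]
      refine le_trans (pvF_le q v L _) ?_
      split_ifs with hc
      · exact le_refl _
      · have : ¬ v x < b := fun hlt => hc ⟨hlt, hq⟩
        omega
    · rw [hstep]; exact ih _ x hx hq

-- B's accumulator, flattened over (position, keyword) pairs
def pvQ (s : String) (x : Int × (String × Int)) : Bool :=
  PySem.Str.startswith (PySem.Str.slice s (some x.1) none) x.2.1

def pvP (s : String) : List (Int × (String × Int)) :=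
  (PySem.List.pyRange 0 (PySem.Str.len s) 1).flatMap (fun i => pvKeywords.map (fun kp => (i, kp)))

def pvBest (s : String) : Int := pvF (pvQ s) (fun x => x.2.2) 5 (pvP s)

theorem alt_eq (ssid : String) :
    detect_uk_provider_alt ssid =
      (if pvBest (PySem.Str.lower ssid) < 5
       then PySem.List.pyGet? pvNames (pvBest (PySem.Str.lower ssid)) else none) := by
  unfold detect_uk_provider_alt pvBest pvP pvF pvQ
  rw [List.foldl_flatMap]
  simp only [List.foldl_map]

-- occurrence at some position ↔ substring (nonempty keyword)
theorem link (l k : List Char) (hk : k ≠ []) :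
    (∃ i : Int, (0 ≤ i ∧ i < (l.length : Int)) ∧
        PySem.Chars.startswith (l.drop i.toNat) k = true) ↔ PySem.Chars.isIn k l = true := by
  constructor
  · rintro ⟨i, _, hsw⟩
    rw [← PySem.Chars.exists_prefix_drop_iff_isIn]
    exact ⟨i.toNat, (PySem.Chars.startswith_iff _ _).mp hsw⟩
  · intro hin
    obtain ⟨j, hpre⟩ := (PySem.Chars.exists_prefix_drop_iff_isIn k l).mpr hin
    have hjl : j < l.length := by
      by_contra h
      have : l.drop j = [] := List.drop_eq_nil_of_le (by omega)
      rw [this] at hpre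
      exact hk (List.prefix_nil.mp hpre)
    exact ⟨(j : Int), ⟨by omega, by exact_mod_cast hjl⟩,
      by simpa using (PySem.Chars.startswith_iff _ _).mpr hpre⟩

theorem pvBest_le (s kw : String) (j : Int) (hmem : (kw, j) ∈ pvKeywords)
    (hin : PySem.Str.isIn kw s = true) : pvBest s ≤ j := by
  have hne : kw.toList ≠ [] := by
    have : ∀ kp ∈ pvKeywords, kp.1.toList ≠ [] := by decide
    exact this (kw, j) hmem
  have hin' : PySem.Chars.isIn kw.toList s.toList = true := by
    simpa using hin
  obtain ⟨i, hi, hsw⟩ := (link s.toList kw.toList hne).mpr hin'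
  have hx : ((i, (kw, j)) : Int × (String × Int)) ∈ pvP s := by
    simp only [pvP, List.mem_flatMap, List.mem_map]
    refine ⟨i, ?_, ⟨(kw, j), hmem, rfl⟩⟩
    have h2 : i < ((s.length : Nat) : Int) := by
      rw [← String.length_toList]; exact hi.2
    simp [PySem.List.mem_pyRange_one, hi.1]
    exact_mod_cast h2
  have hq : pvQ s (i, (kw, j)) = true := by
    simp only [pvQ]
    simp only [PySem.Str.startswith_eq, PySem.Str.toList_slice, PySem.Chars.slice_eq_listSlice]
    rw [PySem.List.slice_from _ hi.1]
    exact hsw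
  exact pvF_upper _ _ _ 5 _ hx hq

theorem pvBest_matched (s : String) (x : Int × (String × Int)) (hx : x ∈ pvP s)
    (hq : pvQ s x = true) : PySem.Str.isIn x.2.1 s = true := by
  obtain ⟨i, hi, kp, _, rfl⟩ := by
    simpa only [pvP, List.mem_flatMap, List.mem_map] using hx
  have hi' := (PySem.List.mem_pyRange_one).mp hi
  simp only [pvQ] at hq
  simp only [PySem.Str.startswith_eq, PySem.Str.toList_slice, PySem.Chars.slice_eq_listSlice] at hq
  rw [PySem.List.slice_from _ hi'.1] at hq
  simp only [PySem.Str.isIn_eq]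
  rw [← PySem.Chars.exists_prefix_drop_iff_isIn]
  exact ⟨i.toNat, (PySem.Chars.startswith_iff _ _).mp hq⟩

theorem pvBest_le5 (s : String) : pvBest s ≤ 5 := pvF_le _ _ _ 5

theorem pvBest_ge (s : String) (j : Int) (hj5 : j ≤ 5)
    (hj : ∀ kp ∈ pvKeywords, kp.2 < j → PySem.Str.isIn kp.1 s = false) : j ≤ pvBest s := by
  rcases pvF_achieved (pvQ s) (fun x => x.2.2) (pvP s) 5 with h | ⟨x, hx, hq, he⟩
  · have : pvBest s = 5 := h
    omega
  · have hkp : x.2 ∈ pvKeywords := by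
      obtain ⟨i, hi, kp, hkpm, rfl⟩ := by simpa only [pvP, List.mem_flatMap, List.mem_map] using hx
      exact hkpm
    have hin := pvBest_matched s x hx hq
    by_contra hcon
    have hbe : pvBest s = x.2.2 := he
    have hlt : x.2.2 < j := by omega
    have hfalse := hj x.2 hkp hlt
    rw [hin] at hfalse
    exact absurd hfalse (by simp)

-- ===== VERDICT (by name: the statement is the Claim_ definition above) =====
set_option maxHeartbeats 800000 in
theorem detect_uk_provider_spec : Claim_equal_detect_uk_provider := by
  intro ssid _
  unfold Spec_detect_uk_provider
  rw [alt_eq]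
  simp only [detect_uk_provider, List.any_cons, List.any_nil, Bool.or_false]
  by_cases h0 : (PySem.Str.isIn "vm" (PySem.Str.lower ssid) ||
      (PySem.Str.isIn "virgin" (PySem.Str.lower ssid) ||
      PySem.Str.isIn "superhub" (PySem.Str.lower ssid))) = true
  · have hle : pvBest (PySem.Str.lower ssid) ≤ 0 := by
      simp only [Bool.or_eq_true] at h0
      rcases h0 with h | h | h <;> exact pvBest_le _ _ 0 (by decide) h
    have hge : 0 ≤ pvBest (PySem.Str.lower ssid) := by
      refine pvBest_ge _ 0 (by omega) ?_
      intro kp hkp hlt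
      exact absurd hlt (by have := (by decide : ∀ kp ∈ pvKeywords, 0 ≤ kp.2) kp hkp; omega)
    have hr : pvBest (PySem.Str.lower ssid) = 0 := by omega
    rw [if_pos h0, hr]; norm_num [pvNames, PySem.List.pyGet?, PySem.List.pyIdx?]
  rw [if_neg h0]
  simp only [Bool.or_eq_true, not_or, Bool.not_eq_true] at h0
  by_cases h1 : (PySem.Str.isIn "bt" (PySem.Str.lower ssid) ||
      (PySem.Str.isIn "bthub" (PySem.Str.lower ssid) ||
      (PySem.Str.isIn "homehub" (PySem.Str.lower ssid) ||
      PySem.Str.isIn "smarthub" (PySem.Str.lower ssid)))) = true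
  · have hle : pvBest (PySem.Str.lower ssid) ≤ 1 := by
      simp only [Bool.or_eq_true] at h1
      rcases h1 with h | h | h | h <;> exact pvBest_le _ _ 1 (by decide) h
    have hge : 1 ≤ pvBest (PySem.Str.lower ssid) := by
      refine pvBest_ge _ 1 (by omega) ?_
      intro kp hkp hlt
      simp only [pvKeywords, List.mem_cons, List.not_mem_nil, or_false] at hkp
      rcases hkp with rfl | rfl | rfl | rfl | rfl | rfl | rfl | rfl | rfl | rfl | rfl | rfl | rfl <;>
        [exact h0.1;
         exact h0.2.1;
         exact h0.2.2;
         exact absurd hlt (by norm_num);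
         exact absurd hlt (by norm_num);
         exact absurd hlt (by norm_num);
         exact absurd hlt (by norm_num);
         exact absurd hlt (by norm_num);
         exact absurd hlt (by norm_num);
         exact absurd hlt (by norm_num);
         exact absurd hlt (by norm_num);
         exact absurd hlt (by norm_num);
         exact absurd hlt (by norm_num)]
    have hr : pvBest (PySem.Str.lower ssid) = 1 := by omega
    rw [if_pos h1, hr]; norm_num [pvNames, PySem.List.pyGet?, PySem.List.pyIdx?]
  rw [if_neg h1]
  simp only [Bool.or_eq_true, not_or, Bool.not_eq_true] at h1
  by_cases h2 : (PySem.Str.isIn "ee" (PySem.Str.lower ssid) ||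
      (PySem.Str.isIn "brightbox" (PySem.Str.lower ssid) ||
      PySem.Str.isIn "ee-" (PySem.Str.lower ssid))) = true
  · have hle : pvBest (PySem.Str.lower ssid) ≤ 2 := by
      simp only [Bool.or_eq_true] at h2
      rcases h2 with h | h | h <;> exact pvBest_le _ _ 2 (by decide) h
    have hge : 2 ≤ pvBest (PySem.Str.lower ssid) := by
      refine pvBest_ge _ 2 (by omega) ?_
      intro kp hkp hlt
      simp only [pvKeywords, List.mem_cons, List.not_mem_nil, or_false] at hkp
      rcases hkp with rfl | rfl | rfl | rfl | rfl | rfl | rfl | rfl | rfl | rfl | rfl | rfl | rfl <;>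
        [exact h0.1;
         exact h0.2.1;
         exact h0.2.2;
         exact h1.1;
         exact h1.2.1;
         exact h1.2.2.1;
         exact h1.2.2.2;
         exact absurd hlt (by norm_num);
         exact absurd hlt (by norm_num);
         exact absurd hlt (by norm_num);
         exact absurd hlt (by norm_num);
         exact absurd hlt (by norm_num);
         exact absurd hlt (by norm_num)]
    have hr : pvBest (PySem.Str.lower ssid) = 2 := by omega
    rw [if_pos h2, hr]; norm_num [pvNames, PySem.List.pyGet?, PySem.List.pyIdx?]; rfl
  rw [if_neg h2]
  simp only [Bool.or_eq_true, not_or, Bool.not_eq_true] at h2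
  by_cases h3 : PySem.Str.isIn "sky" (PySem.Str.lower ssid) = true
  · have hle : pvBest (PySem.Str.lower ssid) ≤ 3 := pvBest_le _ _ 3 (by decide) h3
    have hge : 3 ≤ pvBest (PySem.Str.lower ssid) := by
      refine pvBest_ge _ 3 (by omega) ?_
      intro kp hkp hlt
      simp only [pvKeywords, List.mem_cons, List.not_mem_nil, or_false] at hkp
      rcases hkp with rfl | rfl | rfl | rfl | rfl | rfl | rfl | rfl | rfl | rfl | rfl | rfl | rfl <;>
        [exact h0.1;
         exact h0.2.1;
         exact h0.2.2;
         exact h1.1;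
         exact h1.2.1;
         exact h1.2.2.1;
         exact h1.2.2.2;
         exact h2.1;
         exact h2.2.1;
         exact h2.2.2;
         exact absurd hlt (by norm_num);
         exact absurd hlt (by norm_num);
         exact absurd hlt (by norm_num)]
    have hr : pvBest (PySem.Str.lower ssid) = 3 := by omega
    rw [if_pos h3, hr]; norm_num [pvNames, PySem.List.pyGet?, PySem.List.pyIdx?]; rfl
  rw [if_neg h3]
  rw [Bool.not_eq_true] at h3
  by_cases h4 : (PySem.Str.isIn "talktalk" (PySem.Str.lower ssid) ||
      PySem.Str.isIn "tt-" (PySem.Str.lower ssid)) = true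
  · have hle : pvBest (PySem.Str.lower ssid) ≤ 4 := by
      simp only [Bool.or_eq_true] at h4
      rcases h4 with h | h <;> exact pvBest_le _ _ 4 (by decide) h
    have hge : 4 ≤ pvBest (PySem.Str.lower ssid) := by
      refine pvBest_ge _ 4 (by omega) ?_
      intro kp hkp hlt
      simp only [pvKeywords, List.mem_cons, List.not_mem_nil, or_false] at hkp
      rcases hkp with rfl | rfl | rfl | rfl | rfl | rfl | rfl | rfl | rfl | rfl | rfl | rfl | rfl <;>
        [exact h0.1;
         exact h0.2.1;
         exact h0.2.2;
         exact h1.1;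
         exact h1.2.1;
         exact h1.2.2.1;
         exact h1.2.2.2;
         exact h2.1;
         exact h2.2.1;
         exact h2.2.2;
         exact h3;
         exact absurd hlt (by norm_num);
         exact absurd hlt (by norm_num)]
    have hr : pvBest (PySem.Str.lower ssid) = 4 := by omega
    rw [if_pos h4, hr]; norm_num [pvNames, PySem.List.pyGet?, PySem.List.pyIdx?]; rfl
  rw [if_neg h4]
  simp only [Bool.or_eq_true, not_or, Bool.not_eq_true] at h4
  have hge : 5 ≤ pvBest (PySem.Str.lower ssid) := by
    refine pvBest_ge _ 5 (by omega) ?_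
    intro kp hkp hlt
    simp only [pvKeywords, List.mem_cons, List.not_mem_nil, or_false] at hkp
    rcases hkp with rfl | rfl | rfl | rfl | rfl | rfl | rfl | rfl | rfl | rfl | rfl | rfl | rfl <;>
      [exact h0.1;
       exact h0.2.1;
       exact h0.2.2;
       exact h1.1;
       exact h1.2.1;
       exact h1.2.2.1;
       exact h1.2.2.2;
       exact h2.1;
       exact h2.2.1;
       exact h2.2.2;
       exact h3;
       exact h4.1;
       exact h4.2]
  have hr : pvBest (PySem.Str.lower ssid) = 5 := by
    have := pvBest_le5 (PySem.Str.lower ssid); omega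
  rw [hr]; norm_num
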